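-- pv_equiv track=rewrite | github.com/varunkumar2003/Extracting-Task-1 | taskone.py | parse_articles
-- ===== SOURCE A (Python) =====
-- def parse_articles(text):
--     articles = []
--     current_title = None
--     current_body = []
--     s_no = 1
--
--     for line in text.split('\n'):
--         if line.strip().isupper() and len(line.strip().split()) < 10:  # Assuming titles are in uppercase and less than 10 words
--             if current_title:
--                 articles.append((s_no, current_title, " ".join(current_body).strip()))
--                 s_no += 1
--             current_title = line.strip()
--             current_body = []
--         else:
--             current_body.append(line.strip())
--
--     if current_title:  # Append the last article
--         articles.append((s_no, current_title, " ".join(current_body).strip()))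
--
--     return articles
-- ===== SOURCE B (Python) =====
-- def parse_articles(text):
--     def is_title(line):
--         s = line.strip()
--         return s.isupper() and len(s.split()) < 10
--
--     lines = text.split('\n')
--     n = len(lines)
--     # Phase 1: segment the line list into (title, body) pairs with index pointers.
--     segments = []
--     i = 0
--     while i < n and not is_title(lines[i]):
--         i += 1                      # drop lines before the first title
--     while i < n:
--         j = i + 1
--         while j < n and not is_title(lines[j]):
--             j += 1                  # body = lines strictly between two titles
--         body = " ".join(l.strip() for l in lines[i + 1:j]).strip()
--         segments.append((lines[i].strip(), body))
--         i = j
--     # Phase 2: number the segments.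
--     return [(k, t, b) for k, (t, b) in enumerate(segments, 1)]
-- ===== Notes on version B (the rewrite author's own statement) =====
-- stated objective: alternative
-- what changed: A is a single pass with a running (current_title, current_body, s_no) accumulator flushed at each title and at the end; B first segments the line list into (title, body) pairs with index pointers (skip preamble, then take lines strictly between consecutive titles), and numbers the segments in a separate enumerate phase.
import Mathlib
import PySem

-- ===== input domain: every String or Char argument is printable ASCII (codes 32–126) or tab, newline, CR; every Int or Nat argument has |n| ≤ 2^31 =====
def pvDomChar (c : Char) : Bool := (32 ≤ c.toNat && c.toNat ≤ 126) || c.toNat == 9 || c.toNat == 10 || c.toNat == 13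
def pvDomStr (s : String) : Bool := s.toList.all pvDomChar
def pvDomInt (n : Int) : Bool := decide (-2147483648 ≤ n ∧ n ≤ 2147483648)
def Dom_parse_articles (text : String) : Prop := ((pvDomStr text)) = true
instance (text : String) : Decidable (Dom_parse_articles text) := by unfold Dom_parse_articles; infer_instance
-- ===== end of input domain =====

-- B replaces A's running-accumulator pass by an index-pointer segmentation phase followed by a
-- separate numbering phase (alternative decomposition, same cost); return values proved equal.

-- ===== PORT A =====
-- shared primitives (the same Python expressions appear verbatim in both sources)
def pvStrip (s : String) : String := PySem.Str.strip s

-- s.isupper() ported by hand (no string-level isupper in PySem): exact on ASCII, where the cased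
-- characters are exactly a-z/A-Z — true iff some character is uppercase and none is lowercase.
def pvStrIsupper (s : String) : Bool :=
  s.toList.any (fun c => PySem.Str.isupper c) && s.toList.all (fun c => !PySem.Str.islower c)

-- line.strip().isupper() and len(line.strip().split()) < 10
def pvIsTitle (line : String) : Bool :=
  pvStrIsupper (pvStrip line) && decide ((PySem.Str.split₀ (pvStrip line)).length < 10)

-- text.split('\n')  ('\n' ≠ '', so split? is always some; the default is never used)
def pvLines (text : String) : List String := (PySem.Str.split? text "\n").getD [text]

-- " ".join(body).strip()
def pvJoinBody (body : List String) : String := PySem.Str.strip (PySem.Str.join " " body)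

-- one iteration of A's for-loop over (articles, s_no, current_title, current_body);
-- 'if current_title:' is Python truthiness: none and some "" are falsy
def stepA (st : List (Int × String × String) × Int × Option String × List String) (line : String) :
    List (Int × String × String) × Int × Option String × List String :=
  match st with
  | (arts, sno, ot, body) =>
    if pvIsTitle line then
      match ot with
      | some t =>
          if t == "" then (arts, sno, some (pvStrip line), ([] : List String))
          else (arts ++ [(sno, t, pvJoinBody body)], sno + 1, some (pvStrip line), ([] : List String))
      | none => (arts, sno, some (pvStrip line), ([] : List String))
    else (arts, sno, ot, body ++ [pvStrip line])

-- the trailing 'if current_title: append the last article'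
def finishA (st : List (Int × String × String) × Int × Option String × List String) :
    List (Int × String × String) :=
  match st with
  | (arts, sno, ot, body) =>
    match ot with
    | some t => if t == "" then arts else arts ++ [(sno, t, pvJoinBody body)]
    | none => arts

def parse_articles (text : String) : List (Int × String × String) :=
  finishA ((pvLines text).foldl stepA ([], 1, none, []))

-- ===== PORT B =====
def pvNotTitle (l : String) : Bool := !pvIsTitle l

-- B's outer while loop: head of the list is the current title, the body runs to the next title
def segGo : List String → List (String × String)
  | [] => []
  | l :: ls =>
      (pvStrip l, pvJoinBody ((ls.takeWhile pvNotTitle).map pvStrip))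
        :: segGo (ls.dropWhile pvNotTitle)
termination_by ls => ls.length
decreasing_by
  exact Nat.lt_succ_of_le (List.length_dropWhile_le _ _)

def parse_articles_alt (text : String) : List (Int × String × String) :=
  let segs := segGo ((pvLines text).dropWhile pvNotTitle)
  (PySem.List.enumerate segs 1).map (fun p => (p.1, p.2.1, p.2.2))

-- ===== PRECONDITION & SPEC =====
def Spec_parse_articles (text : String) (out : List (Int × String × String)) : Prop := out = parse_articles_alt text
instance (text : String) (out : List (Int × String × String)) : Decidable (Spec_parse_articles text out) := by unfold Spec_parse_articles; infer_instance

-- ===== CLAIM (what is proved, stated in full; the proofs are below) =====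
def Claim_equal_parse_articles : Prop := ∀ (text : String), Dom_parse_articles text → Spec_parse_articles text (parse_articles text)

-- ===== LEMMAS AND PROOFS =====

-- the (title, body) pairs A's loop will emit from state (current_title = t, current_body = body)
def pfun (t : String) (body : List String) : List String → List (String × String)
  | [] => [(t, pvJoinBody body)]
  | l :: ls =>
      if pvIsTitle l then (t, pvJoinBody body) :: pfun (pvStrip l) [] ls
      else pfun t (body ++ [pvStrip l]) ls

-- numbering the emitted pairs from s_no upward
def numFrom (sno : Int) : List (String × String) → List (Int × String × String)
  | [] => []
  | (t, b) :: ps => (sno, t, b) :: numFrom (sno + 1) ps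

theorem strip_ne_empty_of_title {l : String} (h : pvIsTitle l = true) : pvStrip l ≠ "" := by
  intro he
  have h1 : pvStrIsupper (pvStrip l) = true := by
    unfold pvIsTitle at h
    rw [Bool.and_eq_true] at h
    exact h.1
  rw [he] at h1
  simp [pvStrIsupper] at h1

theorem foldl_some (ls : List String) :
    ∀ (arts : List (Int × String × String)) (sno : Int) (t : String) (body : List String),
      t ≠ "" →
      finishA (ls.foldl stepA (arts, sno, some t, body)) = arts ++ numFrom sno (pfun t body ls) := by
  induction ls with
  | nil =>
      intro arts sno t body ht
      simp [finishA, pfun, numFrom, ht]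
  | cons l ls ih =>
      intro arts sno t body ht
      by_cases hl : pvIsTitle l = true
      · have hne : pvStrip l ≠ "" := strip_ne_empty_of_title hl
        simp only [List.foldl_cons, stepA, hl, if_pos, ht, beq_iff_eq, ite_false]
        rw [ih _ _ _ _ hne]
        simp [pfun, hl, numFrom, List.append_assoc]
      · simp only [List.foldl_cons, stepA, Bool.not_eq_true] at hl ⊢
        rw [hl]
        simp only [Bool.false_eq_true, if_false]
        rw [ih _ _ _ _ ht]
        simp [pfun, hl]

-- the pairs emitted from the initial (no current title) state
def startP (ls : List String) : List (String × String) :=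
  match ls.dropWhile pvNotTitle with
  | [] => []
  | l :: ls' => pfun (pvStrip l) [] ls'

theorem foldl_none (ls : List String) :
    ∀ (arts : List (Int × String × String)) (sno : Int) (body : List String),
      finishA (ls.foldl stepA (arts, sno, none, body)) = arts ++ numFrom sno (startP ls) := by
  induction ls with
  | nil =>
      intro arts sno body
      simp [finishA, startP, numFrom]
  | cons l ls ih =>
      intro arts sno body
      by_cases hl : pvIsTitle l = true
      · simp only [List.foldl_cons, stepA, hl, if_pos]
        rw [foldl_some ls arts sno (pvStrip l) [] (strip_ne_empty_of_title hl)]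
        have hd : (l :: ls).dropWhile pvNotTitle = l :: ls := by
          rw [List.dropWhile_cons]
          simp [pvNotTitle, hl]
        simp [startP, hd]
      · simp only [List.foldl_cons, stepA, Bool.not_eq_true] at hl ⊢
        rw [hl]
        simp only [Bool.false_eq_true, if_false]
        rw [ih]
        have hd : (l :: ls).dropWhile pvNotTitle = ls.dropWhile pvNotTitle := by
          rw [List.dropWhile_cons]
          simp [pvNotTitle, hl]
        simp [startP, hd]

theorem pfun_eq_segGo (ls : List String) :
    ∀ (t : String) (body : List String),
      pfun t body ls
        = (t, pvJoinBody (body ++ (ls.takeWhile pvNotTitle).map pvStrip))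
            :: segGo (ls.dropWhile pvNotTitle) := by
  induction ls with
  | nil =>
      intro t body
      simp [pfun, segGo]
  | cons l ls ih =>
      intro t body
      by_cases hl : pvIsTitle l = true
      · have hnt : pvNotTitle l = false := by simp [pvNotTitle, hl]
        rw [List.takeWhile_cons, List.dropWhile_cons]
        simp only [hnt, Bool.false_eq_true, if_false]
        simp only [pfun, hl, if_pos]
        rw [ih (pvStrip l) []]
        simp [segGo]
      · have hnt : pvNotTitle l = true := by simp [pvNotTitle, hl]
        rw [List.takeWhile_cons, List.dropWhile_cons]
        simp only [hnt, if_pos]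
        simp only [pfun, hl, Bool.false_eq_true, if_false]
        rw [ih t (body ++ [pvStrip l])]
        simp [List.append_assoc]

theorem startP_eq_segGo (ls : List String) :
    startP ls = segGo (ls.dropWhile pvNotTitle) := by
  unfold startP
  cases hd : ls.dropWhile pvNotTitle with
  | nil => simp [segGo]
  | cons l ls' =>
      show pfun (pvStrip l) [] ls' = segGo (l :: ls')
      rw [pfun_eq_segGo ls' (pvStrip l) []]
      simp [segGo]

theorem numFrom_eq_enumerate (ps : List (String × String)) :
    ∀ (sno : Int),
      numFrom sno ps = (PySem.List.enumerate ps sno).map (fun p => (p.1, p.2.1, p.2.2)) := by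
  induction ps with
  | nil => intro sno; simp [numFrom, PySem.List.enumerate_nil]
  | cons p ps ih =>
      intro sno
      obtain ⟨t, b⟩ := p
      rw [PySem.List.enumerate_cons]
      simp only [List.map_cons, numFrom]
      rw [ih (sno + 1)]

-- ===== VERDICT (by name: the statement is the Claim_ definition above) =====
theorem parse_articles_spec : Claim_equal_parse_articles := by
  intro text _
  unfold Spec_parse_articles parse_articles parse_articles_alt
  rw [foldl_none (pvLines text) [] 1 []]
  rw [startP_eq_segGo, numFrom_eq_enumerate]
  simp
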